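-- pv_equiv track=rewrite | github.com/Eviaiy/Code-on-time-challenge | partie4.py | calculate_team_time
-- ===== SOURCE A (Python) =====
-- def calculate_team_time(team, athlete_times):
--     total_time = 0
--     for i in range(len(team)):
--         total_time += athlete_times[team[i]]
--         if i > 0:
--             relay_time = (athlete_times[team[i]] - athlete_times[team[i-1]])**2
--             total_time += relay_time
--     return total_time
-- ===== SOURCE B (Python) =====
-- def calculate_team_time(team, athlete_times):
--     # Divide and conquer: the time of a leg team[lo:hi] is the time of its two
--     # halves plus the squared transition penalty at the junction.
--     def solve(lo, hi):
--         if hi - lo == 1: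
--             return athlete_times[team[lo]]
--         mid = (lo + hi) // 2
--         boundary = (athlete_times[team[mid]] - athlete_times[team[mid - 1]]) ** 2
--         return solve(lo, mid) + solve(mid, hi) + boundary
--     if not team:
--         return 0
--     return solve(0, len(team))
-- ===== Notes on version B (the rewrite author's own statement) =====
-- stated objective: alternative
-- what changed: Replaces A's single left-to-right indexed loop by a divide-and-conquer recursion: a leg's time is the time of its two halves plus the squared penalty at the junction (correct because the penalty terms are concatenation-additive), which also keeps Python recursion depth O(log n).
import Mathlib
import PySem

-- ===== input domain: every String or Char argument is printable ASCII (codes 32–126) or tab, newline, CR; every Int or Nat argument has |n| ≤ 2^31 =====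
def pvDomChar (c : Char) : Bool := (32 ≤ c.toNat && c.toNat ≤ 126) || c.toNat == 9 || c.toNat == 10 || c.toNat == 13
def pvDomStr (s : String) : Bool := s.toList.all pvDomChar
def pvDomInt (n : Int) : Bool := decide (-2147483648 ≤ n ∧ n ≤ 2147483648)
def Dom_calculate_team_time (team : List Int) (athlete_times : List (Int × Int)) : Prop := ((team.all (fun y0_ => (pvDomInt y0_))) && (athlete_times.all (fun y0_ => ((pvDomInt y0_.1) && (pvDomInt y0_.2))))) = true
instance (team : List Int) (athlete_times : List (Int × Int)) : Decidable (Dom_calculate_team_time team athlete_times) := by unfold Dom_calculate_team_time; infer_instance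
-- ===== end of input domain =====

-- B replaces A's single left-to-right indexed loop by a divide-and-conquer recursion
-- (leg time = two halves plus the squared penalty at the junction); objective: alternative.
-- Shared helper: the dict access athlete_times[k] (association list, first match; total
-- under Pre_, which requires every team member to be a key).
def pvLookup (d : List (Int × Int)) (k : Int) : Int :=
  match d.find? (fun p => p.1 == k) with
  | some p => p.2
  | none => 0

-- ===== PORT A =====
-- loop body of A: total_time += athlete_times[team[i]]; if i > 0: add squared relay penalty
def aStep (athlete_times : List (Int × Int)) (team : List Int) (total_time i : Int) : Int :=
  let total_time := total_time + pvLookup athlete_times (PySem.List.pyGetD team i 0)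
  if i > 0 then
    total_time + (pvLookup athlete_times (PySem.List.pyGetD team i 0)
                  - pvLookup athlete_times (PySem.List.pyGetD team (i - 1) 0)) ^ 2
  else total_time

def calculate_team_time (team : List Int) (athlete_times : List (Int × Int)) : Int :=
  (PySem.List.pyRange 0 team.length 1).foldl (aStep athlete_times team) 0

-- ===== PORT B =====
-- Source B's solve(lo, hi): B only ever calls it with lo < hi, where 'hi - lo ≤ 1' is exactly
-- Python's 'hi - lo == 1' (the guard form only makes the recursion total in Lean).
def solveGo (athlete_times : List (Int × Int)) (team : List Int) (lo hi : Nat) : Int :=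
  if hi - lo ≤ 1 then pvLookup athlete_times (team.getD lo 0)
  else
    let mid := (lo + hi) / 2
    let boundary := (pvLookup athlete_times (team.getD mid 0)
                     - pvLookup athlete_times (team.getD (mid - 1) 0)) ^ 2
    solveGo athlete_times team lo mid + solveGo athlete_times team mid hi + boundary
termination_by hi - lo
decreasing_by all_goals omega

def calculate_team_time_alt (team : List Int) (athlete_times : List (Int × Int)) : Int :=
  if team.isEmpty then 0 else solveGo athlete_times team 0 team.length

-- ===== PRECONDITION & SPEC =====
-- Pre_ excludes team members missing from the dict, where Python raises KeyError (both A and B).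
def Pre_calculate_team_time (team : List Int) (athlete_times : List (Int × Int)) : Prop :=
  ∀ t ∈ team, ∃ p ∈ athlete_times, p.1 = t
instance (team : List Int) (athlete_times : List (Int × Int)) : Decidable (Pre_calculate_team_time team athlete_times) := by unfold Pre_calculate_team_time; infer_instance
def pvWitness_calculate_team_time : List Int × (List (Int × Int)) := ([1, 2, 1], [(1, 5), (2, 7)])

def Spec_calculate_team_time (team : List Int) (athlete_times : List (Int × Int)) (out : Int) : Prop := out = calculate_team_time_alt team athlete_times
instance (team : List Int) (athlete_times : List (Int × Int)) (out : Int) : Decidable (Spec_calculate_team_time team athlete_times out) := by unfold Spec_calculate_team_time; infer_instance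

-- ===== CLAIM (what is proved, stated in full; the proofs are below) =====
def Claim_equal_calculate_team_time : Prop := ∀ (team : List Int) (athlete_times : List (Int × Int)), Dom_calculate_team_time team athlete_times → Pre_calculate_team_time team athlete_times → Spec_calculate_team_time team athlete_times (calculate_team_time team athlete_times)

-- ===== LEMMAS AND PROOFS =====

-- value of runner i; penalty at junction i
def vAt (d : List (Int × Int)) (team : List Int) (i : Nat) : Int :=
  pvLookup d (team.getD i 0)
def penAt (d : List (Int × Int)) (team : List Int) (i : Nat) : Int :=
  (vAt d team i - vAt d team (i - 1)) ^ 2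

-- closed-form segment value: base times over [lo, hi), penalties over (lo, hi)
def segF (d : List (Int × Int)) (team : List Int) (lo hi : Nat) : Int :=
  ((List.range' lo (hi - lo)).map (vAt d team)).sum
  + ((List.range' (lo + 1) (hi - (lo + 1))).map (penAt d team)).sum

theorem range'_split (s m n : Nat) (h1 : s ≤ m) (h2 : m ≤ n) :
    List.range' s (n - s) = List.range' s (m - s) ++ List.range' m (n - m) := by
  have := @List.range'_append s (m - s) (n - m) 1
  simp only [one_mul] at this
  rw [show s + (m - s) = m by omega] at this
  rw [show m - s + (n - m) = n - s by omega] at this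
  exact this.symm

theorem segF_split (d : List (Int × Int)) (team : List Int) (lo mid hi : Nat)
    (h1 : lo < mid) (h2 : mid < hi) :
    segF d team lo hi = segF d team lo mid + segF d team mid hi + penAt d team mid := by
  unfold segF
  rw [range'_split lo mid hi (by omega) (by omega),
      range'_split (lo + 1) mid hi (by omega) (by omega),
      show List.range' mid (hi - mid) = mid :: List.range' (mid + 1) (hi - (mid + 1)) by
        rw [show hi - mid = (hi - (mid + 1)) + 1 by omega, List.range'_succ]]
  simp [List.sum_append]
  ring

theorem solveGo_eq (d : List (Int × Int)) (team : List Int) :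
    ∀ lo hi : Nat, lo < hi → solveGo d team lo hi = segF d team lo hi := by
  intro lo hi
  fun_induction solveGo d team lo hi with
  | case1 lo hi h =>
    intro hlt
    have : hi = lo + 1 := by omega
    subst this
    simp [segF, vAt]
  | case2 lo hi h mid boundary ihL ihR =>
    intro _
    have hmid : mid = (lo + hi) / 2 := rfl
    have hb : boundary = penAt d team mid := rfl
    rw [ihL (by omega), ihR (by omega), hb,
        segF_split d team lo mid hi (by omega) (by omega)]

-- A after n loop iterations equals the segment value of team[0:n]
theorem a_loop_eq (d : List (Int × Int)) (team : List Int) :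
    ∀ n : Nat,
      (PySem.List.pyRange 0 (n : Int) 1).foldl (aStep d team) 0 = segF d team 0 n := by
  intro n
  induction n with
  | zero => simp [segF]
  | succ m ih =>
    have hcast : ((m + 1 : Nat) : Int) = (m : Int) + 1 := by push_cast; ring
    rw [hcast, PySem.List.pyRange_one_succ_right (by positivity), List.foldl_append, ih]
    simp only [List.foldl_cons, List.foldl_nil]
    unfold aStep
    have hget : PySem.List.pyGetD team (m : Int) 0 = team.getD m 0 := by
      simp [PySem.List.pyGetD_natCast]
    by_cases hm : 0 < m
    · have hget1 : PySem.List.pyGetD team ((m : Int) - 1) 0 = team.getD (m - 1) 0 := by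
        rw [show ((m : Int) - 1) = ((m - 1 : Nat) : Int) by omega]
        simp [PySem.List.pyGetD_natCast]
      rw [if_pos (by exact_mod_cast hm)]
      unfold segF
      rw [show (m + 1) - 0 = m + 1 by omega, show m - 0 = m by omega, List.range'_concat,
          show (m + 1) - (0 + 1) = (m - (0 + 1)) + 1 by omega, List.range'_concat]
      simp [List.sum_append, hget, hget1, vAt, penAt, show 0 + 1 + (m - 1) = m by omega]
      ring
    · have hm0 : m = 0 := by omega
      subst hm0
      rw [if_neg (by omega)]
      simp [segF, vAt, PySem.List.pyGetD_zero]

theorem main_eq (team : List Int) (d : List (Int × Int)) :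
    calculate_team_time team d = calculate_team_time_alt team d := by
  unfold calculate_team_time calculate_team_time_alt
  cases team with
  | nil => simp
  | cons t ts =>
    rw [if_neg (by simp)]
    rw [a_loop_eq d (t :: ts) (t :: ts).length, solveGo_eq d (t :: ts) 0 (t :: ts).length (by simp)]

-- ===== VERDICT (by name: the statement is the Claim_ definition above) =====
theorem calculate_team_time_spec : Claim_equal_calculate_team_time := by
  intro team d _ _
  exact main_eq team d
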